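-- pv_equiv track=rewrite | github.com/kwang927/Doris-Mae-Dataset | benchmarking/dataset_util.py | create_aspect_id2annotation
-- ===== SOURCE A (Python) =====
-- def create_aspect_id2annotation(data):
--     """
--     Input: data with at least the "Annotation" key
--
--     Output: return the aspect_id to annotation dictionary, where the key is the aspect_id
--             and the value is a list of annotated question pairs whose aspect_id is equal to
--             the aforementioned aspect_id
--     """
--     aspect_id2annotation= {}
--     Annotation = data['Annotation']
--
--     for a in Annotation:
--         if a['aspect_id'] not in aspect_id2annotation.keys():
--             aspect_id2annotation[a['aspect_id']]=[]
--         aspect_id2annotation[a['aspect_id']].append(a)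
--     return aspect_id2annotation
-- ===== SOURCE B (Python) =====
-- def create_aspect_id2annotation(data):
--     Annotation = data['Annotation']
--     keys = dict.fromkeys(a['aspect_id'] for a in Annotation)
--     return {k: [a for a in Annotation if a['aspect_id'] == k] for k in keys}
-- ===== Notes on version B (the rewrite author's own statement) =====
-- stated objective: alternative
-- what changed: B replaces A's single pass that mutates a dict of growing lists by a two-phase algorithm: first collect the distinct aspect_ids in order of first occurrence (dict.fromkeys), then build each group with an independent filtering comprehension over the whole annotation list.
import Mathlib
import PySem

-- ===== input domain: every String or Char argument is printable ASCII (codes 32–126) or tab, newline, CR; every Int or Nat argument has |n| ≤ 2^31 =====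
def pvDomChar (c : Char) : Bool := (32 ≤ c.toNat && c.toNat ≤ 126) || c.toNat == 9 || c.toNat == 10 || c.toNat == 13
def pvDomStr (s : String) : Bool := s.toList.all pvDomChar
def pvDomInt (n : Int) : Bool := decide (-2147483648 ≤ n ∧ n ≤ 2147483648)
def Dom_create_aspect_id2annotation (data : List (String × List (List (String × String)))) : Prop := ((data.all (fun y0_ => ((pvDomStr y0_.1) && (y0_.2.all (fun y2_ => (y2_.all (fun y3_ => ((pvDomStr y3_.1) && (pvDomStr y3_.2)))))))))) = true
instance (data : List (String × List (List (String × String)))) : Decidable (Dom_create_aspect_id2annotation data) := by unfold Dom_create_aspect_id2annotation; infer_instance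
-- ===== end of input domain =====

-- B groups annotations by building the first-occurrence list of distinct aspect_ids and then
-- filtering the annotation list once per key, instead of A's single dict-mutating pass (objective: alternative).

-- ===== PORT A =====
-- shared dict-lookup helpers (Python dict as assoc list, first match)
def pvLookupS (xs : List (String × String)) (k : String) : Option String :=
  (xs.find? (fun p => p.1 == k)).map (·.2)

-- a['aspect_id'] (Pre_ guarantees the key is present, so the "" default is never used)
def pvAspect (a : List (String × String)) : String :=
  (pvLookupS a "aspect_id").getD ""

-- data['Annotation'] (Pre_ guarantees the key is present)
def pvAnnotation (data : List (String × List (List (String × String)))) : List (List (String × String)) :=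
  ((data.find? (fun p => p.1 == "Annotation")).map (·.2)).getD []

def create_aspect_id2annotation (data : List (String × List (List (String × String)))) : List (String × List (List (String × String))) :=
  let Annotation := pvAnnotation data
  (Annotation.foldl (fun d a =>
      let k := pvAspect a
      let d := if d.contains k then d else d.insert k ([] : List (List (String × String)))
      d.modify k [] (· ++ [a])) PySem.Dict.empty).items

-- ===== PORT B =====
def create_aspect_id2annotation_alt (data : List (String × List (List (String × String)))) : List (String × List (List (String × String))) :=
  let Annotation := pvAnnotation data
  let keys := PySem.Set.ofList (Annotation.map pvAspect)
  keys.map (fun k => (k, Annotation.filter (fun a => pvAspect a == k)))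

-- ===== PRECONDITION & SPEC =====
-- Pre_ excludes exactly the inputs where Python raises KeyError: data without an "Annotation"
-- key, or an annotation without an "aspect_id" key.
def Pre_create_aspect_id2annotation (data : List (String × List (List (String × String)))) : Prop :=
  (data.find? (fun p => p.1 == "Annotation")).isSome = true ∧
  ∀ a ∈ pvAnnotation data, (a.find? (fun p => p.1 == "aspect_id")).isSome = true
instance (data : List (String × List (List (String × String)))) : Decidable (Pre_create_aspect_id2annotation data) := by unfold Pre_create_aspect_id2annotation; infer_instance

def pvWitness_create_aspect_id2annotation : (List (String × List (List (String × String)))) :=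
  [("Annotation", [[("aspect_id", "a"), ("q", "x")], [("aspect_id", "b")], [("aspect_id", "a")]])]

def Spec_create_aspect_id2annotation (data : List (String × List (List (String × String)))) (out : List (String × List (List (String × String)))) : Prop := out = create_aspect_id2annotation_alt data
instance (data : List (String × List (List (String × String)))) (out : List (String × List (List (String × String)))) : Decidable (Spec_create_aspect_id2annotation data out) := by unfold Spec_create_aspect_id2annotation; infer_instance

-- ===== CLAIM (what is proved, stated in full; the proofs are below) =====
def Claim_equal_create_aspect_id2annotation : Prop := ∀ (data : List (String × List (List (String × String)))), Dom_create_aspect_id2annotation data → Pre_create_aspect_id2annotation data → Spec_create_aspect_id2annotation data (create_aspect_id2annotation data)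

-- ===== LEMMAS AND PROOFS =====

-- A's "if absent, insert []; then append" step is the single modify step
theorem pv_step_collapse {ν : Type} (d : PySem.Dict String (List ν)) (k : String) (f : List ν → List ν) :
    (if d.contains k then d else d.insert k []).modify k [] f = d.modify k [] f := by
  by_cases h : d.contains k
  · simp [h]
  · simp [h, PySem.Dict.modify, PySem.Dict.getD_insert_self,
      PySem.Dict.insert_insert_self, PySem.Dict.getD_of_not_contains]

-- characterisation of A's grouping loop as B's map-over-distinct-keys
theorem pv_group_loop (l : List (List (String × String))) :
    (l.foldl (fun d a => d.modify (pvAspect a) [] (· ++ [a]))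
        (PySem.Dict.empty : PySem.Dict String (List (List (String × String))))).items =
    (PySem.Set.ofList (l.map pvAspect)).map (fun k => (k, l.filter (fun a => pvAspect a == k))) := by
  set D := l.foldl (fun d a => d.modify (pvAspect a) [] (· ++ [a]))
      (PySem.Dict.empty : PySem.Dict String (List (List (String × String)))) with hDdef
  have hnd : D.keys.Nodup := by
    exact PySem.Dict.nodup_keys_foldl_modify_key l pvAspect [] (fun _ a => (· ++ [a])) _
      PySem.Dict.nodup_keys_empty
  have hkeys : D.keys = PySem.Set.ofList (l.map pvAspect) := by
    rw [hDdef, PySem.Dict.keys_foldl_modify_key]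
    simp [PySem.Set.update_nil_left]
  have hget : ∀ c, D.getD c [] = l.filter (fun a => pvAspect a == c) := by
    intro c
    have hfm : D = (l.map (fun a => (pvAspect a, a))).foldl
        (fun d p => d.modify p.1 [] (· ++ [p.2])) PySem.Dict.empty := by
      rw [hDdef, List.foldl_map]
    rw [hfm, PySem.Dict.getD_foldl_modify_append]
    simp [List.filter_map, Function.comp_def]
  rw [PySem.Dict.items_eq_map_keys D hnd [], hkeys]
  exact List.map_congr_left (fun k _ => by rw [hget k])

-- ===== VERDICT (by name: the statement is the Claim_ definition above) =====
theorem create_aspect_id2annotation_spec : Claim_equal_create_aspect_id2annotation := by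
  intro data _ _
  unfold Spec_create_aspect_id2annotation create_aspect_id2annotation create_aspect_id2annotation_alt
  simp only [pv_step_collapse]
  exact pv_group_loop (pvAnnotation data)
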